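-- pv_equiv track=rewrite | github.com/rodrigodesalvobraz/neuralpp | neuralpp/util/tensor_mixed_radix.py | compute_strides_and_max_value
-- ===== SOURCE A (Python) =====
-- def compute_strides_and_max_value(radices):
--     if len(radices) == 0:
--         return [], 0
--     strides = [1] * len(radices)
--     for i in range(len(radices) - 2, -1, -1):
--         # i in len(radices) - 2, ..., 0
--         strides[i] = radices[i + 1] * strides[i + 1]
--     max_value = radices[0] * strides[0] - 1
--     return strides, max_value
-- ===== SOURCE B (Python) =====
-- def compute_strides_and_max_value(radices):
--     # Divide and conquer: for a block, strides = (left strides scaled by the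
--     # right block's product) + right strides; the block's product comes along.
--     def go(rs):
--         if len(rs) == 0:
--             return [], 1
--         if len(rs) == 1:
--             return [1], rs[0]
--         mid = len(rs) // 2
--         ls, lp = go(rs[:mid])
--         rs_, rp = go(rs[mid:])
--         return [s * rp for s in ls] + rs_, lp * rp
--     strides, total = go(radices)
--     return strides, total - 1
-- ===== Notes on version B (the rewrite author's own statement) =====
-- stated objective: alternative
-- what changed: Replaces A's single backward index-mutating suffix-product pass with a divide-and-conquer recursion: the list is split in half, each half's strides and product are computed recursively, the left strides are scaled by the right half's product and the halves concatenated, and the max value is the root product minus one; it trades A's linear pass for O(n log n) multiplications, which is slower on very long lists because the scaled values are big integers.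
import Mathlib
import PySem

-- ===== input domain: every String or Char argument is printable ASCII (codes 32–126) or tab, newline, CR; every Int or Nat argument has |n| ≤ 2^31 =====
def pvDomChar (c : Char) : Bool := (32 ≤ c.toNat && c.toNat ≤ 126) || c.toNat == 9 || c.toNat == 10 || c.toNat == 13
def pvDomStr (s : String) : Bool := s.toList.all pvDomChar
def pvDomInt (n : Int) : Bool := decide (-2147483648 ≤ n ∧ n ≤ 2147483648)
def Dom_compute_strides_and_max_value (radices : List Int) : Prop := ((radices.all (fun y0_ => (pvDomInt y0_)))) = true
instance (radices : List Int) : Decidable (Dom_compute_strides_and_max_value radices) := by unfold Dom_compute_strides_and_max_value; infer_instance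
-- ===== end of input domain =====

-- B replaces A's backward in-place suffix-product pass with a divide-and-conquer
-- recursion on halves (alternative algorithm, not faster: more big-integer work; return value only).


-- ===== PORT A =====
-- all indices used by A are in range, so pyGetD with default 0 is exact here
def compute_strides_and_max_value (radices : List Int) : List Int × Int :=
  if radices.length = 0 then ([], 0)
  else
    let strides :=
      (PySem.List.pyRange ((radices.length : Int) - 2) (-1) (-1)).foldl
        (fun s i =>
          s.set i.toNat (PySem.List.pyGetD radices (i + 1) 0 * PySem.List.pyGetD s (i + 1) 0))
        (List.replicate radices.length (1 : Int))
    (strides, PySem.List.pyGetD radices 0 0 * PySem.List.pyGetD strides 0 0 - 1)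

-- ===== PORT B =====
-- helper `go` of Source B: strides and product of a block, by splitting it in half
def goB : List Int → List Int × Int
  | [] => ([], 1)
  | [r] => ([1], r)
  | x :: y :: t =>
    let l := x :: y :: t
    let mid := l.length / 2
    let left := goB (l.take mid)
    let right := goB (l.drop mid)
    (left.1.map (· * right.2) ++ right.1, left.2 * right.2)
termination_by l => l.length
decreasing_by
  · simp only [List.length_take, List.length_cons]; omega
  · simp only [List.length_drop, List.length_cons]; omega

def compute_strides_and_max_value_alt (radices : List Int) : List Int × Int :=
  let p := goB radices
  (p.1, p.2 - 1)

-- ===== PRECONDITION & SPEC =====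
def Spec_compute_strides_and_max_value (radices : List Int) (out : List Int × Int) : Prop := out = compute_strides_and_max_value_alt radices
instance (radices : List Int) (out : List Int × Int) : Decidable (Spec_compute_strides_and_max_value radices out) := by unfold Spec_compute_strides_and_max_value; infer_instance

-- ===== CLAIM (what is proved, stated in full; the proofs are below) =====
def Claim_equal_compute_strides_and_max_value : Prop := ∀ (radices : List Int), Dom_compute_strides_and_max_value radices → Spec_compute_strides_and_max_value radices (compute_strides_and_max_value radices)

-- ===== LEMMAS AND PROOFS =====

/-- The suffix-product list: `suf l` has `(l.drop (j+1)).prod` at position `j`. -/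
def suf : List Int → List Int
  | [] => []
  | _ :: t => t.prod :: suf t

lemma suf_singleton (l : List Int) (h : l.length = 1) : suf l = [1] := by
  match l, h with
  | [x], _ => simp [suf]

lemma suf_append (a b : List Int) :
    suf (a ++ b) = (suf a).map (· * b.prod) ++ suf b := by
  induction a with
  | nil => simp [suf]
  | cons h t ih => simp [suf, ih, List.prod_append]

/-- Characterisation of B's divide-and-conquer helper. -/
lemma goB_char (l : List Int) : goB l = (suf l, l.prod) := by
  induction l using goB.induct with
  | case1 => simp [goB, suf]
  | case2 r => simp [goB, suf]
  | case3 x y t _l _mid ihl ihr =>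
      rw [goB]
      rw [ihl, ihr]
      have h := List.take_append_drop ((x :: y :: t).length / 2) (x :: y :: t)
      rw [← suf_append, ← List.prod_append, h]

lemma alt_char (l : List Int) :
    compute_strides_and_max_value_alt l = (suf l, l.prod - 1) := by
  unfold compute_strides_and_max_value_alt
  rw [goB_char]

/-- Loop invariant for A's backward in-place pass. -/
lemma suf_length (l : List Int) : (suf l).length = l.length := by
  induction l with
  | nil => rfl
  | cons h t ih => simp [suf, ih]

lemma loop_inv (radices : List Int) (k : Nat) (hk : k + 1 ≤ radices.length) :
    (PySem.List.pyRange ((k : Int) - 1) (-1) (-1)).foldl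
      (fun s i =>
        s.set i.toNat (PySem.List.pyGetD radices (i + 1) 0 * PySem.List.pyGetD s (i + 1) 0))
      (List.replicate k 1 ++ suf (radices.drop k))
      = suf radices := by
  induction k with
  | zero =>
      rw [PySem.List.pyRange_neg_one_eq_nil (by norm_num)]
      simp
  | succ k ih =>
      have hk' : k + 1 ≤ radices.length := Nat.le_of_succ_le hk
      rw [show ((k + 1 : Nat) : Int) - 1 = (k : Int) by push_cast; ring,
        PySem.List.pyRange_neg_one_cons (by omega)]
      have hd : radices.drop k = radices[k] :: radices.drop (k + 1) :=
        List.drop_eq_getElem_cons (by omega)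
      have hd1 : radices.drop (k + 1) = radices[k + 1] :: radices.drop (k + 2) :=
        List.drop_eq_getElem_cons (by omega)
      have hlen2 : (List.replicate (k+1) (1:Int) ++ suf (radices.drop (k+1))).length
          = radices.length := by
        simp [suf_length]
        omega
      have h1 : PySem.List.pyGetD radices ((k : Int) + 1) 0 = radices[k + 1] := by
        rw [PySem.List.pyGetD_eq_getElem _ _ (by omega) (by omega)]
        simp only [show ((k : Int) + 1).toNat = k + 1 from by omega]
        rfl
      have h2 : PySem.List.pyGetD (List.replicate (k+1) (1:Int) ++ suf (radices.drop (k+1)))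
          ((k : Int) + 1) 0 = (radices.drop (k + 2)).prod := by
        rw [PySem.List.pyGetD_eq_getElem _ _ (by omega) (by rw [hlen2]; omega)]
        simp only [show ((k : Int) + 1).toNat = k + 1 from by omega]
        rw [List.getElem_append_right (by simp)]
        simp only [List.length_replicate, Nat.sub_self, hd1, suf]
        rfl
      have hstep :
          (List.replicate (k+1) (1:Int) ++ suf (radices.drop (k+1))).set
              ((k : Int)).toNat
              (PySem.List.pyGetD radices ((k : Int) + 1) 0 *
               PySem.List.pyGetD (List.replicate (k+1) (1:Int) ++ suf (radices.drop (k+1)))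
                 ((k : Int) + 1) 0)
            = List.replicate k 1 ++ suf (radices.drop k) := by
        rw [h1, h2]
        rw [show List.replicate (k+1) (1:Int) = List.replicate k 1 ++ [1] from by
          simp [List.replicate_succ']]
        rw [List.append_assoc, List.set_append_right _ _ (by simp)]
        simp only [Int.toNat_natCast, List.length_replicate, Nat.sub_self, List.singleton_append,
          List.set_cons_zero]
        rw [hd, suf, hd1, List.prod_cons]
      rw [List.foldl_cons]
      show List.foldl _
          ((List.replicate (k+1) (1:Int) ++ suf (radices.drop (k+1))).set ((k : Int)).toNat
            (PySem.List.pyGetD radices ((k : Int) + 1) 0 *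
             PySem.List.pyGetD (List.replicate (k+1) (1:Int) ++ suf (radices.drop (k+1)))
               ((k : Int) + 1) 0)) _ = _
      rw [hstep]
      exact ih hk'

lemma a_char (l : List Int) :
    compute_strides_and_max_value l = (suf l, l.prod - 1) := by
  match l with
  | [] => simp [compute_strides_and_max_value, suf]
  | r :: t =>
      unfold compute_strides_and_max_value
      rw [if_neg (by simp)]
      have hlen : (r :: t).length = t.length + 1 := by simp
      have hstrides :
          (PySem.List.pyRange (((r :: t).length : Int) - 2) (-1) (-1)).foldl
            (fun s i =>
              s.set i.toNat (PySem.List.pyGetD (r :: t) (i + 1) 0 * PySem.List.pyGetD s (i + 1) 0))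
            (List.replicate (r :: t).length 1) = suf (r :: t) := by
        have hinit : List.replicate (r :: t).length (1:Int)
            = List.replicate t.length 1 ++ suf ((r :: t).drop t.length) := by
          have : ((r :: t).drop t.length).length = 1 := by simp
          rw [suf_singleton _ this]
          simp [List.replicate_succ']
        have hcast : (((r :: t).length : Int) - 2) = ((t.length : Int) - 1) := by
          push_cast [hlen]; ring
        rw [hcast, hinit]
        exact loop_inv (r :: t) t.length (by simp)
      rw [hstrides]
      show (suf (r :: t), PySem.List.pyGetD (r :: t) 0 0 * PySem.List.pyGetD (suf (r :: t)) 0 0 - 1)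
          = (suf (r :: t), (r :: t).prod - 1)
      have hmax : PySem.List.pyGetD (r :: t) 0 0 * PySem.List.pyGetD (suf (r :: t)) 0 0 - 1
          = (r :: t).prod - 1 := by
        simp [suf, PySem.List.pyGetD_zero_cons]
      rw [hmax]

-- ===== VERDICT (by name: the statement is the Claim_ definition above) =====
theorem compute_strides_and_max_value_spec : Claim_equal_compute_strides_and_max_value := by
  intro radices _
  unfold Spec_compute_strides_and_max_value
  rw [a_char, alt_char]
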